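-- pv_equiv track=rewrite | github.com/jefflord/DTStoDDPlus | DTStoDDPlus.py | find_target_dts_index
-- ===== SOURCE A (Python) =====
-- from typing import List, Optional, Dict, Tuple
--
-- TARGET_DTS_LANGUAGE = "en"  # English
--
-- COMPATIBLE_EXISTING_FORMATS = {"AC-3", "E-AC-3", "AAC"}  # If any present, skip file
--
-- def find_target_dts_index(audio_tracks: List[Dict]) -> Tuple[Optional[int], str]:
--     if not audio_tracks:
--         return None, "No audio tracks found"
--     has_compatible = [
--         t for t in audio_tracks if t["format"] in COMPATIBLE_EXISTING_FORMATS
--     ]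
--     if has_compatible:
--         fmts = ", ".join({t["format"] for t in has_compatible})
--         return None, f"Found existing compatible format(s): {fmts}; skipping"
--     for idx, t in enumerate(audio_tracks):
--         if t["format"] == "DTS" and t["language"] == TARGET_DTS_LANGUAGE:
--             return idx, "OK"
--     has_dts = any(t["format"] == "DTS" for t in audio_tracks)
--     if not has_dts:
--         return None, "No DTS tracks present"
--     has_english_dts = any(
--         t["format"] == "DTS" and t["language"] == TARGET_DTS_LANGUAGE
--         for t in audio_tracks
--     )
--     if not has_english_dts:
--         return None, "DTS present but no English DTS track"
--     return None, "Unknown filtering condition"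
-- ===== SOURCE B (Python) =====
-- from typing import List, Optional, Dict, Tuple
--
-- TARGET_DTS_LANGUAGE = "en"  # English
--
-- COMPATIBLE_EXISTING_FORMATS = {"AC-3", "E-AC-3", "AAC"}  # If any present, skip file
--
-- def find_target_dts_index(audio_tracks: List[Dict]) -> Tuple[Optional[int], str]:
--     # Single pass over the tracks, then decide in priority order.
--     if not audio_tracks:
--         return None, "No audio tracks found"
--     compat_fmts = []          # distinct compatible formats, in encounter order
--     en_dts_idx = None         # index of the first English DTS track
--     has_dts = False
--     for idx, t in enumerate(audio_tracks):
--         f = t["format"]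
--         if f in COMPATIBLE_EXISTING_FORMATS:
--             if f not in compat_fmts:
--                 compat_fmts.append(f)
--         elif f == "DTS":
--             has_dts = True
--             if en_dts_idx is None and t.get("language") == TARGET_DTS_LANGUAGE:
--                 en_dts_idx = idx
--     if compat_fmts:
--         fmts = ", ".join(compat_fmts)
--         return None, f"Found existing compatible format(s): {fmts}; skipping"
--     if en_dts_idx is not None:
--         return en_dts_idx, "OK"
--     if has_dts:
--         return None, "DTS present but no English DTS track"
--     return None, "No DTS tracks present"
-- ===== Notes on version B (the rewrite author's own statement) =====
-- stated objective: simpler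
-- what changed: Replaced A's four separate passes (filter for compatible formats, enumerate-scan for English DTS, two any-scans) by one loop that simultaneously collects the distinct compatible formats in encounter order, records the first English-DTS index and a has-DTS flag, followed by a priority-ordered decision; the unreachable 'Unknown filtering condition' branch is dropped.
import Mathlib
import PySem

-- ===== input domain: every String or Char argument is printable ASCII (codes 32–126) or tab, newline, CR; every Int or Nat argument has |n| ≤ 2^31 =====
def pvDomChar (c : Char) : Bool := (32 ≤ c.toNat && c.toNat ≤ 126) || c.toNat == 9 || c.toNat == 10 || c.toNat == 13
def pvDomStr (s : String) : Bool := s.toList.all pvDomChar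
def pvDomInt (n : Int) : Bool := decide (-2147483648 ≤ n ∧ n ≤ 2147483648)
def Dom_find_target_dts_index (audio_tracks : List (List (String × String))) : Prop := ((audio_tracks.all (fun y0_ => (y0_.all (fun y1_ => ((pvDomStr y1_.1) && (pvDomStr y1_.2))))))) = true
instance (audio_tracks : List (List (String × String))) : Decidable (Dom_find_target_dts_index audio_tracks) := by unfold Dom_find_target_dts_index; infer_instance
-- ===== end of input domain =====

-- B replaces A's four separate passes by one loop plus a priority-ordered decision (objective: simpler).

-- ===== PORT A =====
-- COMPATIBLE_EXISTING_FORMATS (a Python set literal used only for membership tests, which are order-independent)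
def pvCompatFmts : List String := ["AC-3", "E-AC-3", "AAC"]

-- 'f in COMPATIBLE_EXISTING_FORMATS'
def pvIsCompat (f : String) : Bool := pvCompatFmts.contains f

-- t["format"] / t["language"]; getD "" is exact under Pre_ (the key is present wherever A reads it)
def pvFmt (t : List (String × String)) : String := (PySem.Dict.mk t).getD "format" ""
def pvLang? (t : List (String × String)) : Option String := (PySem.Dict.mk t).get? "language"

-- the 'for idx, t in enumerate(audio_tracks)' loop with its early return
def pvLoopA : List (List (String × String)) → Int → Option Int
  | [], _ => none
  | t :: rest, idx =>
    if pvFmt t = "DTS" ∧ (pvLang? t).getD "" = "en" then some idx else pvLoopA rest (idx + 1)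

def find_target_dts_index (audio_tracks : List (List (String × String))) : Option Int × String :=
  if audio_tracks = [] then (none, "No audio tracks found")
  else
    let has_compatible := audio_tracks.filter (fun t => pvIsCompat (pvFmt t))
    if has_compatible ≠ [] then
      -- ", ".join over a Python set: the hash iteration order is not modelled; Pre_ admits at most
      -- one distinct compatible format, where the join is order-independent and this is exact
      let fmts := String.intercalate ", " (PySem.Set.ofList (has_compatible.map (fun t => pvFmt t)))
      (none, "Found existing compatible format(s): " ++ fmts ++ "; skipping")
    else
      match pvLoopA audio_tracks 0 with
      | some idx => (some idx, "OK")
      | none =>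
        let has_dts := audio_tracks.any (fun t => pvFmt t == "DTS")
        if !has_dts then (none, "No DTS tracks present")
        else
          let has_english_dts :=
            audio_tracks.any (fun t => pvFmt t == "DTS" && (pvLang? t).getD "" == "en")
          if !has_english_dts then (none, "DTS present but no English DTS track")
          else (none, "Unknown filtering condition")

-- ===== PORT B =====
-- the single pass: state (compat_fmts, en_dts_idx, has_dts); 'if f not in compat_fmts: append' is Set.add
def pvLoopB : List (List (String × String)) → Int → List String → Option Int → Bool →
    List String × Option Int × Bool
  | [], _, cf, ei, hd => (cf, ei, hd)
  | t :: rest, idx, cf, ei, hd =>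
    let f := pvFmt t
    if pvIsCompat f then
      pvLoopB rest (idx + 1) (PySem.Set.add cf f) ei hd
    else if f = "DTS" then
      pvLoopB rest (idx + 1) cf
        (if ei = none ∧ pvLang? t = some "en" then some idx else ei) true
    else
      pvLoopB rest (idx + 1) cf ei hd

def find_target_dts_index_alt (audio_tracks : List (List (String × String))) : Option Int × String :=
  if audio_tracks = [] then (none, "No audio tracks found")
  else
    match pvLoopB audio_tracks 0 [] none false with
    | (cf, ei, hd) =>
      if cf ≠ [] then
        (none, "Found existing compatible format(s): " ++ String.intercalate ", " cf ++ "; skipping")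
      else
        match ei with
        | some i => (some i, "OK")
        | none =>
          if hd then (none, "DTS present but no English DTS track")
          else (none, "No DTS tracks present")

-- ===== PRECONDITION & SPEC =====
-- Pre_ excludes tracks without a "format" key and (when no compatible format is present) DTS tracks
-- without a "language" key not preceded by an English DTS track — on both A raises KeyError — and
-- inputs with two or more distinct compatible formats, on which A still returns but its message joins
-- a Python set in hash order, which is run-dependent and is an artefact nobody would specify.
def Pre_find_target_dts_index (audio_tracks : List (List (String × String))) : Prop :=
  (∀ t ∈ audio_tracks, ((PySem.Dict.mk t).get? "format").isSome) ∧
  (PySem.Set.ofList ((audio_tracks.map pvFmt).filter (fun f => pvIsCompat f))).length ≤ 1 ∧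
  ((∀ t ∈ audio_tracks, pvIsCompat (pvFmt t) = false) →
    ∀ t ∈ audio_tracks.takeWhile (fun t => !(pvFmt t == "DTS" && pvLang? t == some "en")),
      pvFmt t = "DTS" → pvLang? t ≠ none)
instance (audio_tracks : List (List (String × String))) : Decidable (Pre_find_target_dts_index audio_tracks) := by
  unfold Pre_find_target_dts_index; infer_instance

def pvWitness_find_target_dts_index : (List (List (String × String))) :=
  [[("format", "DTS"), ("language", "en")], [("format", "MP3")]]

def Spec_find_target_dts_index (audio_tracks : List (List (String × String))) (out : Option Int × String) : Prop := out = find_target_dts_index_alt audio_tracks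
instance (audio_tracks : List (List (String × String))) (out : Option Int × String) : Decidable (Spec_find_target_dts_index audio_tracks out) := by unfold Spec_find_target_dts_index; infer_instance

-- ===== CLAIM (what is proved, stated in full; the proofs are below) =====
def Claim_equal_find_target_dts_index : Prop := ∀ (audio_tracks : List (List (String × String))), Dom_find_target_dts_index audio_tracks → Pre_find_target_dts_index audio_tracks → Spec_find_target_dts_index audio_tracks (find_target_dts_index audio_tracks)

-- ===== LEMMAS AND PROOFS =====

-- "DTS" is not a compatible format
set_option maxRecDepth 4096 in
theorem pvIsCompat_dts : pvIsCompat "DTS" = false := by decide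

-- a compatible format is never "DTS"
set_option maxRecDepth 4096 in
theorem pvCompat_ne_dts {f : String} (h : pvIsCompat f = true) : f ≠ "DTS" := by
  intro he
  subst he
  revert h
  decide

-- first component of B's loop state: the distinct compatible formats, folded with Set.add
theorem pvLoopB_cf (ts : List (List (String × String))) (idx : Int) (cf : List String)
    (ei : Option Int) (hd : Bool) :
    (pvLoopB ts idx cf ei hd).1 =
      (ts.filter (fun t => pvIsCompat (pvFmt t))).foldl
        (fun s t => PySem.Set.add s (pvFmt t)) cf := by
  induction ts generalizing idx cf ei hd with
  | nil => rfl
  | cons t rest ih =>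
    rw [pvLoopB, List.filter_cons]
    by_cases hc : pvIsCompat (pvFmt t) = true
    · simp [hc, ih]
    · by_cases hdts : pvFmt t = "DTS"
      · simp [hc, hdts, ih, pvIsCompat_dts]
      · simp [hc, hdts, ih]

-- third component of B's loop state: the has_dts flag
theorem pvLoopB_hd (ts : List (List (String × String))) (idx : Int) (cf : List String)
    (ei : Option Int) (hd : Bool) :
    (pvLoopB ts idx cf ei hd).2.2 = (hd || ts.any (fun t => pvFmt t == "DTS")) := by
  induction ts generalizing idx cf ei hd with
  | nil => simp [pvLoopB]
  | cons t rest ih =>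
    rw [pvLoopB]
    by_cases hc : pvIsCompat (pvFmt t) = true
    · have hbe : (pvFmt t == "DTS") = false := beq_eq_false_iff_ne.mpr (pvCompat_ne_dts hc)
      simp [hc, ih, hbe]
    · by_cases hdts : pvFmt t = "DTS"
      · simp [hc, hdts, ih, pvIsCompat_dts]
      · have hbe : (pvFmt t == "DTS") = false := beq_eq_false_iff_ne.mpr hdts
        simp [hc, hdts, ih, hbe]

-- second component of B's loop state vs A's enumerate loop
theorem pvLoopB_ei (ts : List (List (String × String))) (idx : Int) (cf : List String)
    (ei : Option Int) (hd : Bool) :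
    (pvLoopB ts idx cf ei hd).2.1 =
      (match ei with | some i => some i | none => pvLoopA ts idx) := by
  induction ts generalizing idx cf ei hd with
  | nil => cases ei <;> simp [pvLoopB, pvLoopA]
  | cons t rest ih =>
    rw [pvLoopB]
    by_cases hc : pvIsCompat (pvFmt t) = true
    · have hne := pvCompat_ne_dts hc
      cases ei <;> simp [pvLoopA, hc, hne, ih]
    · by_cases hdts : pvFmt t = "DTS"
      · cases ei with
        | none =>
          by_cases hl : pvLang? t = some "en"
          · have hgd : (pvLang? t).getD "" = "en" := by rw [hl]; rfl
            simp [pvLoopA, hc, hdts, hl, hgd, ih, pvIsCompat_dts]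
          · have hgd : ¬ (pvLang? t).getD "" = "en" := by
              cases hlv : pvLang? t with
              | none => simp
              | some s =>
                simp only [Option.getD_some]
                intro hs
                exact hl (by rw [hlv, hs])
            simp [pvLoopA, hc, hdts, hl, hgd, ih, pvIsCompat_dts]
        | some i => simp [pvLoopA, hc, hdts, ih, pvIsCompat_dts]
      · cases ei <;> simp [pvLoopA, hc, hdts, ih]

-- if A's enumerate loop found nothing, the has_english_dts scan finds nothing either
theorem pvLoopA_none_any (ts : List (List (String × String))) (idx : Int)
    (h : pvLoopA ts idx = none) :
    ts.any (fun t => pvFmt t == "DTS" && (pvLang? t).getD "" == "en") = false := by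
  induction ts generalizing idx with
  | nil => rfl
  | cons t rest ih =>
    by_cases hcond : pvFmt t = "DTS" ∧ (pvLang? t).getD "" = "en"
    · simp [pvLoopA, hcond] at h
    · rw [pvLoopA] at h
      rw [if_neg hcond] at h
      have hrest := ih (idx + 1) h
      simp only [List.any_cons, hrest, Bool.or_false]
      rcases not_and_or.mp hcond with hx | hx <;> simp [hx]

-- Set.ofList of the mapped filter equals the fold B performs
theorem pvOfList_map (ts : List (List (String × String))) :
    PySem.Set.ofList ((ts.filter (fun t => pvIsCompat (pvFmt t))).map (fun t => pvFmt t)) =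
      (ts.filter (fun t => pvIsCompat (pvFmt t))).foldl
        (fun s t => PySem.Set.add s (pvFmt t)) [] := by
  rw [PySem.Set.ofList_eq_foldl, List.foldl_map]

-- Set.ofList is empty exactly on the empty list
theorem pvOfList_ne_nil {α : Type} [BEq α] [LawfulBEq α] (xs : List α) (h : xs ≠ []) :
    PySem.Set.ofList xs ≠ [] := by
  cases xs with
  | nil => exact absurd rfl h
  | cons x r =>
    intro hnil
    have hx : x ∈ PySem.Set.ofList (x :: r) :=
      (PySem.Set.mem_ofList _ _).mpr (List.mem_cons_self ..)
    rw [hnil] at hx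
    exact absurd hx (List.not_mem_nil)

-- the two ports agree on every input (the Lean ports are total; Pre_ is needed only for
-- fidelity of port A to the Python, whose set-join order and KeyErrors are not modelled)
theorem pv_ports_eq (ts : List (List (String × String))) :
    find_target_dts_index ts = find_target_dts_index_alt ts := by
  by_cases hnil : ts = []
  · simp [find_target_dts_index, find_target_dts_index_alt, hnil]
  · have hcf := pvLoopB_cf ts 0 [] none false
    have hei := pvLoopB_ei ts 0 [] none false
    have hhd := pvLoopB_hd ts 0 [] none false
    rcases hB : pvLoopB ts 0 [] none false with ⟨cf, ei, hd⟩
    rw [hB] at hcf hei hhd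
    simp only at hcf hei hhd
    by_cases hfc : ts.filter (fun t => pvIsCompat (pvFmt t)) = []
    · have hcfnil : cf = [] := by rw [hcf, hfc]; rfl
      cases hA : pvLoopA ts 0 with
      | some i =>
        have heis : ei = some i := by rw [hei, hA]
        simp [find_target_dts_index, find_target_dts_index_alt, hnil, hfc, hB, hcfnil, hA, heis]
      | none =>
        have heis : ei = none := by rw [hei, hA]
        have hany := pvLoopA_none_any ts 0 hA
        have hhd' : hd = ts.any (fun t => pvFmt t == "DTS") := by simpa using hhd
        by_cases hdts : ts.any (fun t => pvFmt t == "DTS") = true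
        · simp [find_target_dts_index, find_target_dts_index_alt, hnil, hfc, hB, hcfnil, hA,
            heis, hany, hhd', hdts]
        · simp only [Bool.not_eq_true] at hdts
          simp [find_target_dts_index, find_target_dts_index_alt, hnil, hfc, hB, hcfnil, hA,
            heis, hany, hhd', hdts]
    · have h1 : PySem.Set.ofList ((ts.filter (fun t => pvIsCompat (pvFmt t))).map
          (fun t => pvFmt t)) = cf := by rw [pvOfList_map, ← hcf]
      have hcfne : cf ≠ [] := by
        rw [← h1]
        exact pvOfList_ne_nil _ (by simp [hfc])
      simp [find_target_dts_index, find_target_dts_index_alt, hnil, hfc, hB, h1, hcfne]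

-- ===== VERDICT (by name: the statement is the Claim_ definition above) =====
theorem find_target_dts_index_spec : Claim_equal_find_target_dts_index := by
  intro ts _ _
  unfold Spec_find_target_dts_index
  exact pv_ports_eq ts
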